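-- pv_equiv track=rewrite | github.com/Petra313/bioinf | Ch1/ba1m.py | text_to_num
-- ===== SOURCE A (Python) =====
-- def text_to_num(k,n):
--    pat=''
--    for i in range(n):
--         i=k%4
--         if i==0:
--          c='A'
--         elif i==1:
--             c='C'
--         elif i==2:
--             c='G'
--         else:
--             c='T'
--         k=k//4
--         pat=c+pat
--    return pat
-- ===== SOURCE B (Python) =====
-- def text_to_num(k, n):
--     return ''.join('ACGT'[(k >> (2 * i)) % 4] for i in range(n - 1, -1, -1))
-- ===== Notes on version B (the rewrite author's own statement) =====
-- stated objective: faster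
-- what changed: B computes each nucleotide independently as 'ACGT'[(k >> 2i) % 4] for i = n-1..0 and joins them in one pass, replacing A's loop that maintains a running quotient and prepends one character to a growing string each iteration.
import Mathlib
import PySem

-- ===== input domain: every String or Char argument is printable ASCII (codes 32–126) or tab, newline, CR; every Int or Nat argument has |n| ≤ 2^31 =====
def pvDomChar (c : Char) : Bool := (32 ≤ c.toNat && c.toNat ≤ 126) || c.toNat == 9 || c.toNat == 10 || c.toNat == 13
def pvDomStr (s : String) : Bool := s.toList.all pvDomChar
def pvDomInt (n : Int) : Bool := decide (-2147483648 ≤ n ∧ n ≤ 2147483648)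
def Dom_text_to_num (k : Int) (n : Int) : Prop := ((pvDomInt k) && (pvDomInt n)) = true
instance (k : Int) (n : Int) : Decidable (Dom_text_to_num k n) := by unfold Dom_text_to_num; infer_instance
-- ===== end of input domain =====

-- B emits each nucleotide directly from bits of k ((k >> 2i) % 4, MSB first, joined in one pass)
-- instead of A's LSB-first loop that prepends to a growing string (objective: faster).


-- ===== PORT A =====
-- strings are built on the List Char side (String.mk at the end), as the PySem prelude prescribes
def text_to_num (k : Int) (n : Int) : String :=
  String.mk (((PySem.List.pyRange 0 n 1).foldl
    (fun (st : Int × List Char) (_i : Int) =>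
      let i := PySem.Int.mod st.1 4
      let c : List Char := if i = 0 then ['A'] else if i = 1 then ['C'] else if i = 2 then ['G'] else ['T']
      (PySem.Int.floordiv st.1 4, c ++ st.2))
    (k, [])).2)

-- ===== PORT B =====
-- 'ACGT'[d]: d = (k >> 2i) % 4 always lies in [0,4), so the IndexError branch (.getD default) is unreachable.
-- i ranges over range(n-1,-1,-1), so i ≥ 0 and the shift (2*i).toNat is exact.
def text_to_num_alt (k : Int) (n : Int) : String :=
  String.mk ((PySem.List.pyRange (n - 1) (-1) (-1)).map
    (fun i => (PySem.List.pyGet? ['A','C','G','T'] (PySem.Int.mod (k >>> (2*i).toNat) 4)).getD 'A'))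

-- ===== PRECONDITION & SPEC =====
def Spec_text_to_num (k : Int) (n : Int) (out : String) : Prop := out = text_to_num_alt k n
instance (k : Int) (n : Int) (out : String) : Decidable (Spec_text_to_num k n out) := by unfold Spec_text_to_num; infer_instance

-- ===== CLAIM (what is proved, stated in full; the proofs are below) =====
def Claim_equal_text_to_num : Prop := ∀ (k : Int) (n : Int), Dom_text_to_num k n → Spec_text_to_num k n (text_to_num k n)

-- ===== LEMMAS AND PROOFS =====

-- the digit → nucleotide map of A's if-chain
def pvDchar (i : Int) : Char :=
  if i = 0 then 'A' else if i = 1 then 'C' else if i = 2 then 'G' else 'T'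

-- A's result characterised: pvGA k m = the m low base-4 digits of k, MSB first (ediv/emod form)
def pvGA : Int → Nat → List Char
  | _, 0 => []
  | k, m+1 => pvGA (k / 4) m ++ [pvDchar (k % 4)]

-- A's running quotient after m iterations
def pvQA : Int → Nat → Int
  | k, 0 => k
  | k, m+1 => pvQA (k / 4) m

-- 'ACGT'[q] agrees with the if-chain for q ∈ [0,4)
theorem pvGet_ACGT (q : Int) (h0 : 0 ≤ q) (h4 : q < 4) :
    (PySem.List.pyGet? ['A','C','G','T'] q).getD 'A' = pvDchar q := by
  interval_cases q <;> decide

-- A's fold over any index list only depends on its length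
theorem pvFoldA (l : List Int) : ∀ (k : Int) (pat : List Char),
    l.foldl (fun (st : Int × List Char) (_i : Int) =>
      let i := PySem.Int.mod st.1 4
      let c : List Char := if i = 0 then ['A'] else if i = 1 then ['C'] else if i = 2 then ['G'] else ['T']
      (PySem.Int.floordiv st.1 4, c ++ st.2)) (k, pat)
      = (pvQA k l.length, pvGA k l.length ++ pat) := by
  induction l with
  | nil => intro k pat; simp [pvQA, pvGA]
  | cons a t ih =>
    intro k pat
    have hmod : PySem.Int.mod k 4 = k % 4 := PySem.Int.mod_eq_emod_of_pos (a := k) (by norm_num)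
    have hdiv : PySem.Int.floordiv k 4 = k / 4 := PySem.Int.floordiv_eq_ediv_of_pos (a := k) (by norm_num)
    have hc : (if k % 4 = 0 then ['A'] else if k % 4 = 1 then ['C'] else if k % 4 = 2 then ['G'] else ['T'])
        = [pvDchar (k % 4)] := by unfold pvDchar; split_ifs <;> rfl
    simp only [List.foldl_cons, hmod, hdiv, hc, ih, List.length_cons]
    simp [pvQA, pvGA]

-- MSB-first cons form of pvGA
theorem pvGA_cons (m : Nat) : ∀ k : Int, pvGA k (m+1) = pvDchar (k / 4 ^ m % 4) :: pvGA k m := by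
  induction m with
  | zero => intro k; simp [pvGA]
  | succ m ih =>
    intro k
    show pvGA (k / 4) (m+1) ++ [pvDchar (k % 4)] = _
    rw [ih (k / 4), Int.ediv_ediv_of_nonneg (by norm_num)]
    have : ((4:Int) * 4 ^ m) = 4 ^ (m+1) := by ring
    rw [this]
    rfl

-- B's map over range(m-1, -1, -1) produces exactly A's digit list
theorem pvMapB (m : Nat) : ∀ k : Int,
    (PySem.List.pyRange ((m:Int) - 1) (-1) (-1)).map
      (fun i => (PySem.List.pyGet? ['A','C','G','T'] (PySem.Int.mod (k >>> (2*i).toNat) 4)).getD 'A')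
      = pvGA k m := by
  induction m with
  | zero =>
    intro k
    rw [PySem.List.pyRange_neg_one_eq_nil (by norm_num)]
    rfl
  | succ m ih =>
    intro k
    have hcons : PySem.List.pyRange ((m:Int) + 1 - 1) (-1) (-1)
        = (m:Int) :: PySem.List.pyRange ((m:Int) - 1) (-1) (-1) := by
      have := PySem.List.pyRange_neg_one_cons (a := (m:Int)) (b := -1) (by omega)
      simpa using this
    have hsh : k >>> (2*(m:Int)) = k / 4 ^ m := by
      have h0 : (2*(m:Int)) = ((2*m : Nat) : Int) := by omega
      have h1 : k >>> ((2*m : Nat) : Int) = k >>> (2*m : Nat) := by cases k <;> cases (2*m) <;> rfl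
      rw [h0, h1, Int.shiftRight_eq_div_pow, pow_mul]
      norm_num
    have hget : (PySem.List.pyGet? ['A','C','G','T'] (k / 4 ^ m % 4)).getD 'A' = pvDchar (k / 4 ^ m % 4) :=
      pvGet_ACGT _ (Int.emod_nonneg _ (by norm_num)) (Int.emod_lt_of_pos _ (by norm_num))
    push_cast
    rw [hcons, List.map_cons, ih k, pvGA_cons]
    simp [hsh, hget]

-- ===== VERDICT (by name: the statement is the Claim_ definition above) =====
theorem text_to_num_spec : Claim_equal_text_to_num := by
  intro k n _
  unfold Spec_text_to_num text_to_num text_to_num_alt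
  rw [pvFoldA]
  by_cases hn : n ≤ 0
  · have hA : (PySem.List.pyRange 0 n 1).length = 0 := by
      rw [PySem.List.pyRange_one_eq_nil hn]; rfl
    have hB : PySem.List.pyRange (n - 1) (-1) (-1) = [] :=
      PySem.List.pyRange_neg_one_eq_nil (by omega)
    rw [hA, hB]
    rfl
  · rw [not_le] at hn
    have hlen : (PySem.List.pyRange 0 n 1).length = n.toNat := by
      rw [PySem.List.length_pyRange_one]; omega
    have hn' : ((n.toNat : Int)) = n := Int.toNat_of_nonneg (by omega)
    have hmap := pvMapB n.toNat k
    rw [hn'] at hmap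
    rw [hlen, hmap]
    simp
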